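-- pv_equiv track=rewrite | github.com/Laboratory-Imaging/limnd2 | src/limnd2/wellplate_factory.py | _index_to_row_label
-- ===== SOURCE A (Python) =====
-- def _index_to_row_label(index: int) -> str:
--     if index < 0:
--         raise ValueError("Row index must be >= 0.")
--     value = index + 1
--     out = []
--     while value > 0:
--         value, rem = divmod(value - 1, 26)
--         out.append(chr(ord("A") + rem))
--     return "".join(reversed(out))
-- ===== SOURCE B (Python) =====
-- def _index_to_row_label(index: int) -> str:
--     if index < 0:
--         raise ValueError("Row index must be >= 0.")
--     # Find the label length L and the first index `start` of the length-L block
--     # (the block of length-L labels holds exactly 26**L indices).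
--     L = 1
--     start = 0
--     while index >= start + 26 ** L:
--         start += 26 ** L
--         L += 1
--     # Within its block the label is the plain base-26 numeral of n, L digits,
--     # written most-significant digit first.
--     n = index - start
--     return "".join(chr(ord("A") + n // 26 ** i % 26) for i in range(L - 1, -1, -1))
-- ===== Notes on version B (the rewrite author's own statement) =====
-- stated objective: alternative
-- what changed: Instead of the bijective-base-26 loop (repeated divmod(value-1,26) appending digits LSB-first then reversing), B first finds the label length L and the block offset by summing powers of 26, then emits the plain base-26 digits of the in-block offset most-significant first with no list and no reversal.
import Mathlib
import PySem

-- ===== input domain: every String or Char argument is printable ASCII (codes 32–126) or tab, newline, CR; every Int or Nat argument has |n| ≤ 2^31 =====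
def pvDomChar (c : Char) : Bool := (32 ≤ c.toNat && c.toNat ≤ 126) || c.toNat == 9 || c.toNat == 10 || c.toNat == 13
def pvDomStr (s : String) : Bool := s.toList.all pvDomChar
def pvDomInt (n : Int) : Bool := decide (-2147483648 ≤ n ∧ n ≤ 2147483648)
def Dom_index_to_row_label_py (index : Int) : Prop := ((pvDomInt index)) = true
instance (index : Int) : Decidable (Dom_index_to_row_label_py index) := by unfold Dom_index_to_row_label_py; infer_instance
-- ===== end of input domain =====

-- B finds the label length and block offset first, then writes plain base-26 digits MSB-first (no list, no reversal); objective: alternative algorithm.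


-- ===== PORT A =====
-- A's while-loop: append digits least-significant first into `out`, then reverse and join.
-- `value` is ≥ 1 on entry (Pre_ excludes index < 0, where Python raises), so it is carried as a Nat.
def pyLoopA (value : Nat) (out : List Char) : List Char :=
  if value > 0 then
    pyLoopA ((value - 1) / 26) (out ++ [Char.ofNat (65 + (value - 1) % 26)])
  else out
termination_by value
decreasing_by have := Nat.div_le_self (value - 1) 26; omega

def index_to_row_label_py (index : Int) : String :=
  String.ofList (pyLoopA (index + 1).toNat []).reverse

-- ===== PORT B =====
-- B's length loop: while index >= start + 26**L: start += 26**L; L += 1.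
def lenLoopB (index start L : Nat) : Nat × Nat :=
  if index ≥ start + 26 ^ L then lenLoopB index (start + 26 ^ L) (L + 1) else (L, start)
termination_by index + 1 - start
decreasing_by have : 0 < 26 ^ L := Nat.pow_pos (by norm_num : (0:Nat) < 26) (n := L); omega

-- B's join over range(L-1, -1, -1): digit i is n // 26**i % 26, emitted MSB first.
def digitsB (n L : Nat) : List Char :=
  match L with
  | 0 => []
  | L' + 1 => Char.ofNat (65 + n / 26 ^ L' % 26) :: digitsB n L'

def index_to_row_label_py_alt (index : Int) : String :=
  let i : Nat := index.toNat
  let p := lenLoopB i 0 1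
  String.ofList (digitsB (i - p.2) p.1)

-- ===== PRECONDITION & SPEC =====
-- Pre_ excludes index < 0, where the Python A raises ValueError.
def Pre_index_to_row_label_py (index : Int) : Prop := 0 ≤ index
instance (index : Int) : Decidable (Pre_index_to_row_label_py index) := by unfold Pre_index_to_row_label_py; infer_instance
def pvWitness_index_to_row_label_py : Int := (27)

def Spec_index_to_row_label_py (index : Int) (out : String) : Prop := out = index_to_row_label_py_alt index
instance (index : Int) (out : String) : Decidable (Spec_index_to_row_label_py index out) := by unfold Spec_index_to_row_label_py; infer_instance

-- ===== CLAIM (what is proved, stated in full; the proofs are below) =====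
def Claim_equal_index_to_row_label_py : Prop := ∀ (index : Int), Dom_index_to_row_label_py index → Pre_index_to_row_label_py index → Spec_index_to_row_label_py index (index_to_row_label_py index)

-- ===== LEMMAS AND PROOFS =====
-- Proof-side bridge: A's loop, digits in MSB-first order.
def goB (value : Nat) : List Char :=
  if value = 0 then []
  else goB ((value - 1) / 26) ++ [Char.ofNat (65 + (value - 1) % 26)]
termination_by value
decreasing_by have := Nat.div_le_self (value - 1) 26; omega

theorem pyLoopA_eq_goB (value : Nat) : ∀ (out : List Char), pyLoopA value out = out ++ (goB value).reverse := by
  induction value using Nat.strong_induction_on with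
  | _ v ih =>
    intro out
    rw [pyLoopA, goB]
    by_cases h : v = 0
    · simp [h]
    · have hv : v > 0 := Nat.pos_of_ne_zero h
      have hlt : (v - 1) / 26 < v := by have := Nat.div_le_self (v - 1) 26; omega
      simp only [if_pos hv, if_neg h, ih _ hlt, List.reverse_append]
      simp

-- fB L = first index of the block of length-L labels (for L ≥ 1).
def fB : Nat → Nat
  | 0 => 0
  | 1 => 0
  | (L + 2) => 26 * fB (L + 1) + 26

theorem fB_succ : ∀ (L : Nat), 1 ≤ L → fB (L + 1) = fB L + 26 ^ L := by
  intro L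
  induction L with
  | zero => omega
  | succ M ih =>
    intro _
    match M, ih with
    | 0, _ => simp [fB]
    | M + 1, ih =>
      show fB (M + 3) = fB (M + 2) + 26 ^ (M + 2)
      have h1 : fB (M + 2) = fB (M + 1) + 26 ^ (M + 1) := ih (by omega)
      have h2 : fB (M + 3) = 26 * fB (M + 2) + 26 := rfl
      have h3 : fB (M + 2) = 26 * fB (M + 1) + 26 := rfl
      have hp : (26 : Nat) ^ (M + 2) = 26 ^ (M + 1) * 26 := pow_succ 26 (M + 1)
      omega

theorem lenLoopB_spec (index : Nat) : ∀ (k start L : Nat), index + 1 - start ≤ k → 1 ≤ L → start = fB L → start ≤ index →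
    1 ≤ (lenLoopB index start L).1 ∧ (lenLoopB index start L).2 = fB (lenLoopB index start L).1 ∧
    (lenLoopB index start L).2 ≤ index ∧ index < (lenLoopB index start L).2 + 26 ^ (lenLoopB index start L).1 := by
  intro k
  induction k with
  | zero => intro start L hk hL hs hsi; omega
  | succ k ih =>
    intro start L hk hL hs hsi
    rw [lenLoopB]
    by_cases h : index ≥ start + 26 ^ L
    · have hpos : 0 < 26 ^ L := Nat.pow_pos (by norm_num : (0:Nat) < 26) (n := L)
      simp only [if_pos h]
      exact ih (start + 26 ^ L) (L + 1) (by omega) (by omega) (by rw [fB_succ L hL, hs]) (by omega)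
    · simp only [if_neg h]
      exact ⟨hL, hs, hsi, by omega⟩

theorem digitsB_split (L : Nat) : ∀ (n : Nat), digitsB n (L + 1) = digitsB (n / 26) L ++ [Char.ofNat (65 + n % 26)] := by
  induction L with
  | zero => intro n; simp [digitsB]
  | succ M ih =>
    intro n
    have hd : n / 26 / 26 ^ M = n / 26 ^ (M + 1) := by
      rw [Nat.div_div_eq_div_mul, pow_succ, Nat.mul_comm]
    calc digitsB n (M + 2)
        = Char.ofNat (65 + n / 26 ^ (M + 1) % 26) :: digitsB n (M + 1) := rfl
      _ = Char.ofNat (65 + n / 26 ^ (M + 1) % 26) :: (digitsB (n / 26) M ++ [Char.ofNat (65 + n % 26)]) := by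
          rw [ih n]
      _ = (Char.ofNat (65 + n / 26 / 26 ^ M % 26) :: digitsB (n / 26) M) ++ [Char.ofNat (65 + n % 26)] := by
          rw [hd, List.cons_append]
      _ = digitsB (n / 26) (M + 1) ++ [Char.ofNat (65 + n % 26)] := rfl

theorem goB_eq_digits : ∀ (M n : Nat), n < 26 ^ (M + 1) → goB (fB (M + 1) + n + 1) = digitsB n (M + 1) := by
  intro M
  induction M with
  | zero =>
    intro n hn
    rw [goB]
    have h26 : n < 26 := by simpa using hn
    have h0 : n / 26 = 0 := Nat.div_eq_of_lt h26
    simp [fB, digitsB, h0, goB, Nat.mod_eq_of_lt h26]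
  | succ M ih =>
    intro n hn
    have hf : fB (M + 2) = 26 * fB (M + 1) + 26 := rfl
    rw [goB]
    have hne : fB (M + 2) + n + 1 ≠ 0 := by omega
    simp only [if_neg hne]
    have hv : fB (M + 2) + n + 1 - 1 = 26 * (fB (M + 1) + 1) + n := by omega
    have hdiv : (26 * (fB (M + 1) + 1) + n) / 26 = fB (M + 1) + 1 + n / 26 := by
      omega
    have hmod : (26 * (fB (M + 1) + 1) + n) % 26 = n % 26 := by
      omega
    have hpow : (26 : Nat) ^ (M + 2) = 26 * 26 ^ (M + 1) := by ring
    have hlt : n / 26 < 26 ^ (M + 1) := Nat.div_lt_of_lt_mul (by omega)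
    have harg : fB (M + 1) + 1 + n / 26 = fB (M + 1) + n / 26 + 1 := by omega
    rw [hv, hdiv, hmod, harg, ih (n / 26) hlt, ← digitsB_split]

-- ===== VERDICT (by name: the statement is the Claim_ definition above) =====
theorem index_to_row_label_py_spec : Claim_equal_index_to_row_label_py := by
  intro index _ hpre
  have hpre' : (0 : Int) ≤ index := hpre
  unfold Spec_index_to_row_label_py index_to_row_label_py index_to_row_label_py_alt
  rw [pyLoopA_eq_goB]
  simp only [List.nil_append, List.reverse_reverse]
  show String.ofList (goB (index + 1).toNat)
      = String.ofList (digitsB (index.toNat - (lenLoopB index.toNat 0 1).2) (lenLoopB index.toNat 0 1).1)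
  obtain ⟨hL, hfs, hsle, hlt⟩ :=
    lenLoopB_spec index.toNat (index.toNat + 1) 0 1 (by omega) (by omega) rfl (by omega)
  rcases hp : lenLoopB index.toNat 0 1 with ⟨L, s⟩
  rw [hp] at hL hfs hsle hlt
  dsimp only at hL hfs hsle hlt ⊢
  obtain ⟨M, rfl⟩ : ∃ M, L = M + 1 := ⟨L - 1, by omega⟩
  have hn : index.toNat - s < 26 ^ (M + 1) := by omega
  have hi1 : (index + 1).toNat = index.toNat + 1 := by omega
  have harg : fB (M + 1) + (index.toNat - s) + 1 = index.toNat + 1 := by omega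
  rw [hi1, ← harg, goB_eq_digits M (index.toNat - s) hn]
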